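-- pv_equiv track=rewrite | github.com/emmadong521-beep/agent-finance | runtime/executors/repo_analyzer_executor.py | _parse_key_file_excerpts
-- ===== SOURCE A (Python) =====
-- def _parse_key_file_excerpts(lines: list[str]) -> dict[str, str]:
--     excerpts: dict[str, str] = {}
--     current_name: str | None = None
--     current_lines: list[str] = []
--
--     for line in lines:
--         if line.startswith("Key file excerpt:"):
--             if current_name is not None:
--                 excerpts[current_name] = "\n".join(current_lines).strip()
--             current_name = line.removeprefix("Key file excerpt:").strip()
--             current_lines = []
--         elif current_name is not None:
--             current_lines.append(line)
--
--     if current_name is not None: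
--         excerpts[current_name] = "\n".join(current_lines).strip()
--     return excerpts
-- ===== SOURCE B (Python) =====
-- def _parse_key_file_excerpts(lines: list[str]) -> dict[str, str]:
--     # Chunk scan: find each header line and the index of the next header;
--     # the block body is the slice between them.
--     hdr = "Key file excerpt:"
--     excerpts: dict[str, str] = {}
--     n = len(lines)
--     i = 0
--     while i < n and not lines[i].startswith(hdr):
--         i += 1
--     while i < n:
--         name = lines[i].removeprefix(hdr).strip()
--         j = i + 1
--         while j < n and not lines[j].startswith(hdr):
--             j += 1
--         excerpts[name] = "\n".join(lines[i + 1:j]).strip()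
--         i = j
--     return excerpts
-- ===== Notes on version B (the rewrite author's own statement) =====
-- stated objective: alternative
-- what changed: Replaces A's incremental state machine (current_name + accumulated current_lines + final flush) with a chunk scan that locates each header index and the index of the next header, slicing the body lines between them.
import Mathlib
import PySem

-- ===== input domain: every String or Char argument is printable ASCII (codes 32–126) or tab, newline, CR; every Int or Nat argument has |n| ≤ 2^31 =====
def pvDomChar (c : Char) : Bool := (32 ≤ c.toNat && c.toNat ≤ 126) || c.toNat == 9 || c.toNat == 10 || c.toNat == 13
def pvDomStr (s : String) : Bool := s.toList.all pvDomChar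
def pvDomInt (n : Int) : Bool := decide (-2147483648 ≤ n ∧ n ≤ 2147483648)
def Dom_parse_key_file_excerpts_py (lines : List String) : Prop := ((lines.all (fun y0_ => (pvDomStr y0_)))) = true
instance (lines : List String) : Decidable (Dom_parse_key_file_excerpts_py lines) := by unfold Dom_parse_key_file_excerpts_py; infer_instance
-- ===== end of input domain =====

-- B replaces A's incremental state machine (current name + accumulated lines) by a
-- chunk scan that finds each header index and the next header index and slices the
-- body between them; objective: alternative decomposition, same cost.

-- Python str.removeprefix, exact: drop the prefix iff the string starts with it.
def pyRemoveprefix (s p : String) : String :=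
  if PySem.Str.startswith s p then String.ofList (s.toList.drop p.toList.length) else s

-- ===== PORT A =====
-- one fold step of A's loop; state = (excerpts, current_name, current_lines)
def pvAStep (st : PySem.Dict String String × Option String × List String) (line : String) :
    PySem.Dict String String × Option String × List String :=
  if PySem.Str.startswith line "Key file excerpt:" then
    let d := match st.2.1 with
      | some n => st.1.insert n (PySem.Str.strip (PySem.Str.join "\n" st.2.2))
      | none => st.1
    (d, some (PySem.Str.strip (pyRemoveprefix line "Key file excerpt:")), [])
  else
    match st.2.1 with
    | some _ => (st.1, st.2.1, st.2.2 ++ [line])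
    | none => st

def parse_key_file_excerpts_py (lines : List String) : List (String × String) :=
  let st := lines.foldl pvAStep (PySem.Dict.empty, none, [])
  let d := match st.2.1 with
    | some n => st.1.insert n (PySem.Str.strip (PySem.Str.join "\n" st.2.2))
    | none => st.1
  d.items

-- ===== PORT B =====
-- Source B's inner scan 'while j < n and not lines[j].startswith(hdr): j += 1'
-- (lines.getD j "" is exact: the loop only reads lines[j] for j < n = len(lines))
def pvFindHdr (lines : List String) (n j : Nat) : Nat :=
  if _h : j < n then
    if PySem.Str.startswith (lines.getD j "") "Key file excerpt:" then j
    else pvFindHdr lines n (j + 1)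
  else j
termination_by n - j

theorem pvFindHdr_le {lines : List String} {n j : Nat} : j ≤ pvFindHdr lines n j := by
  unfold pvFindHdr
  split
  · split
    · exact le_refl j
    · exact le_trans (Nat.le_succ j) pvFindHdr_le
  · exact le_refl j
termination_by n - j

-- Source B's outer 'while i < n' loop
def pvBGo (lines : List String) (n i : Nat) (d : PySem.Dict String String) :
    PySem.Dict String String :=
  if _h : i < n then
    let name := PySem.Str.strip (pyRemoveprefix (lines.getD i "") "Key file excerpt:")
    let j := pvFindHdr lines n (i + 1)
    pvBGo lines n j
      (d.insert name (PySem.Str.strip (PySem.Str.join "\n"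
        (PySem.List.slice lines (some ((i : Int) + 1)) (some (j : Int))))))
  else d
termination_by n - i
decreasing_by
  have : i + 1 ≤ pvFindHdr lines n (i + 1) := pvFindHdr_le
  omega

def parse_key_file_excerpts_py_alt (lines : List String) : List (String × String) :=
  let n := lines.length
  (pvBGo lines n (pvFindHdr lines n 0) PySem.Dict.empty).items

-- ===== PRECONDITION & SPEC =====
def Spec_parse_key_file_excerpts_py (lines : List String) (out : List (String × String)) : Prop := out = parse_key_file_excerpts_py_alt lines
instance (lines : List String) (out : List (String × String)) : Decidable (Spec_parse_key_file_excerpts_py lines out) := by unfold Spec_parse_key_file_excerpts_py; infer_instance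

-- ===== CLAIM (what is proved, stated in full; the proofs are below) =====
def Claim_equal_parse_key_file_excerpts_py : Prop := ∀ (lines : List String), Dom_parse_key_file_excerpts_py lines → Spec_parse_key_file_excerpts_py lines (parse_key_file_excerpts_py lines)

-- ===== LEMMAS AND PROOFS =====

def pvHdr : String := "Key file excerpt:"
def pvNonHdr (l : String) : Bool := !(PySem.Str.startswith l pvHdr)
def pvName (l : String) : String := PySem.Str.strip (pyRemoveprefix l pvHdr)
def pvBody (cl : List String) : String := PySem.Str.strip (PySem.Str.join "\n" cl)

-- common recursive characterisation: rest starts at a header line (or is empty)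
def pvChunks : List String → PySem.Dict String String → PySem.Dict String String
  | [], d => d
  | h :: rest, d =>
      pvChunks (rest.dropWhile pvNonHdr)
        (d.insert (pvName h) (pvBody (rest.takeWhile pvNonHdr)))
termination_by rest _ => rest.length
decreasing_by
  simp only [List.length_cons]
  exact Nat.lt_succ_of_le (List.length_dropWhile_le _ _)

-- A's loop in the some-state, fused with the final flush
def pvG (d : PySem.Dict String String) (name : String) (cl : List String) :
    List String → PySem.Dict String String
  | [] => d.insert name (pvBody cl)
  | l :: ls =>
      if pvNonHdr l then pvG d name (cl ++ [l]) ls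
      else pvG (d.insert name (pvBody cl)) (pvName l) [] ls

theorem pvG_eq_chunks (rest : List String) :
    ∀ (d : PySem.Dict String String) (name : String) (cl : List String),
    pvG d name cl rest =
      pvChunks (rest.dropWhile pvNonHdr)
        (d.insert name (pvBody (cl ++ rest.takeWhile pvNonHdr))) := by
  induction rest with
  | nil => intro d name cl; simp [pvG, pvChunks]
  | cons l ls ih =>
      intro d name cl
      by_cases h : pvNonHdr l
      · simp [pvG, h, ih]
      · simp [pvG, h, pvChunks, ih]

-- A's fold in the some-state equals pvG
theorem pvA_some (rest : List String) :
    ∀ (d : PySem.Dict String String) (name : String) (cl : List String),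
    (match (rest.foldl pvAStep (d, some name, cl)).2.1 with
      | some n => (rest.foldl pvAStep (d, some name, cl)).1.insert n
          (PySem.Str.strip (PySem.Str.join "\n" (rest.foldl pvAStep (d, some name, cl)).2.2))
      | none => (rest.foldl pvAStep (d, some name, cl)).1) = pvG d name cl rest := by
  induction rest with
  | nil => intro d name cl; simp [pvG, pvBody]
  | cons l ls ih =>
      intro d name cl
      by_cases h : PySem.Str.startswith l pvHdr
      · have hstep : pvAStep (d, some name, cl) l =
            (d.insert name (pvBody cl), some (pvName l), []) := by
          simp only [pvAStep, pvHdr] at *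
          rw [if_pos h]; rfl
        have hg : pvG d name cl (l :: ls) =
            pvG (d.insert name (pvBody cl)) (pvName l) [] ls := by
          simp only [pvG, pvNonHdr, pvHdr] at *
          simp at h
          simp [h]
        rw [List.foldl_cons, hstep, hg, ← ih]
      · have hstep : pvAStep (d, some name, cl) l = (d, some name, cl ++ [l]) := by
          simp only [pvAStep, pvHdr] at *
          rw [if_neg h]
        have hg : pvG d name cl (l :: ls) = pvG d name (cl ++ [l]) ls := by
          simp only [pvG, pvNonHdr, pvHdr] at *
          simp at h
          simp [h]
        rw [List.foldl_cons, hstep, hg, ← ih]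

-- A's fold ignores leading non-header lines in the none-state
theorem pvA_skip (rest : List String) (d : PySem.Dict String String) :
    rest.foldl pvAStep (d, none, []) = (rest.dropWhile pvNonHdr).foldl pvAStep (d, none, []) := by
  induction rest with
  | nil => rfl
  | cons l ls ih =>
      by_cases h : pvNonHdr l
      · have h' : ¬ PySem.Str.startswith l pvHdr = true := by simpa [pvNonHdr] using h
        rw [List.dropWhile_cons, if_pos h, List.foldl_cons]
        simp only [pvAStep, pvHdr] at *
        rw [if_neg h']
        exact ih
      · simp [h]

-- pvFindHdr counts the leading non-header lines of the suffix
theorem pvGetD_drop (lines : List String) (j : Nat) (hj : j < lines.length) :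
    lines.drop j = lines.getD j "" :: lines.drop (j + 1) := by
  rw [List.drop_eq_getElem_cons hj]
  congr 1
  simp [List.getD_eq_getElem?_getD, List.getElem?_eq_getElem hj]

theorem pvFindHdr_eq (lines : List String) (j : Nat) :
    pvFindHdr lines lines.length j = j + ((lines.drop j).takeWhile pvNonHdr).length := by
  unfold pvFindHdr
  split
  · rename_i hj
    have hget := pvGetD_drop lines j hj
    split
    · rename_i hs
      have hb : pvNonHdr (lines.getD j "") = false := by
        simp only [pvNonHdr, pvHdr]
        rw [hs]
        rfl
      rw [hget, List.takeWhile_cons, hb]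
      simp
    · rename_i hs
      have hb : pvNonHdr (lines.getD j "") = true := by
        simp only [pvNonHdr, pvHdr]
        cases hx : PySem.Str.startswith (lines.getD j "") "Key file excerpt:"
        · rfl
        · exact absurd hx hs
      rw [pvFindHdr_eq lines (j + 1), hget, List.takeWhile_cons, hb]
      simp only [if_true, List.length_cons]
      omega
  · rename_i hj
    have : lines.drop j = [] := List.drop_eq_nil_of_le (by omega)
    simp [this]
termination_by lines.length - j

-- pvBGo is pvChunks on the suffix
theorem pvBGo_eq_chunks (lines : List String) (i : Nat) (d : PySem.Dict String String) :
    pvBGo lines lines.length i d = pvChunks (lines.drop i) d := by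
  unfold pvBGo
  split
  · rename_i hi
    have hget := pvGetD_drop lines i hi
    have hfind := pvFindHdr_eq lines (i + 1)
    set t := (lines.drop (i + 1)).takeWhile pvNonHdr with ht
    have htp : t <+: lines.drop (i + 1) := List.takeWhile_prefix _
    have hsplit := List.takeWhile_append_dropWhile (p := pvNonHdr) (l := lines.drop (i + 1))
    have hslice : PySem.List.slice lines (some ((i : Int) + 1))
        (some ((pvFindHdr lines lines.length (i + 1) : Nat) : Int)) = t := by
      rw [hfind]
      rw [show ((i : Int) + 1) = ((i + 1 : Nat) : Int) by push_cast; ring]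
      rw [show (((i + 1) + t.length : Nat) : Int) = ((i + 1 : Nat) : Int) + ((t.length : Nat) : Int) by push_cast; ring]
      rw [PySem.List.slice_natCast_add]
      exact (List.prefix_iff_eq_take.mp htp).symm
    have hdropj : lines.drop (pvFindHdr lines lines.length (i + 1)) =
        (lines.drop (i + 1)).dropWhile pvNonHdr := by
      rw [hfind]
      have h1 : lines.drop (i + 1 + t.length) = (lines.drop (i + 1)).drop t.length := by
        rw [List.drop_drop]
      rw [h1]
      conv_lhs => rw [← hsplit]
      rw [← ht, List.drop_left]
    rw [pvBGo_eq_chunks lines (pvFindHdr lines lines.length (i + 1)) _, hdropj, hslice, hget]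
    simp only [pvChunks]
    rw [← ht]
    rfl
  · rename_i hi
    have : lines.drop i = [] := List.drop_eq_nil_of_le (by omega)
    simp [this, pvChunks]
termination_by lines.length - i
decreasing_by
  have : i + 1 ≤ pvFindHdr lines lines.length (i + 1) := pvFindHdr_le
  omega

-- ===== VERDICT (by name: the statement is the Claim_ definition above) =====
theorem parse_key_file_excerpts_py_spec : Claim_equal_parse_key_file_excerpts_py := by
  intro lines _
  simp only [Spec_parse_key_file_excerpts_py, parse_key_file_excerpts_py,
    parse_key_file_excerpts_py_alt]
  rw [pvBGo_eq_chunks, pvFindHdr_eq, Nat.zero_add]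
  have hdrop0 : lines.drop ((lines.takeWhile pvNonHdr).length) = lines.dropWhile pvNonHdr := by
    have h := List.drop_left (l₁ := lines.takeWhile pvNonHdr) (l₂ := lines.dropWhile pvNonHdr)
    rwa [List.takeWhile_append_dropWhile] at h
  rw [List.drop_zero] at *
  rw [hdrop0]
  rw [pvA_skip]
  cases hsplit : lines.dropWhile pvNonHdr with
  | nil => simp [pvChunks]
  | cons h rest =>
      have hh : pvNonHdr h = false := by
        have := List.head_dropWhile_not (p := pvNonHdr) (l := lines) (by simp [hsplit])
        simpa [hsplit] using this
      have hh' : PySem.Str.startswith h pvHdr = true := by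
        simpa [pvNonHdr] using hh
      simp only [List.foldl_cons]
      have hstep : pvAStep (PySem.Dict.empty, none, []) h =
          (PySem.Dict.empty, some (pvName h), []) := by
        simp [pvAStep, pvHdr] at *
        simp [hh', pvName, pvHdr]
      rw [hstep]
      rw [pvA_some rest PySem.Dict.empty (pvName h) []]
      rw [pvG_eq_chunks]
      simp [pvChunks, pvBody]
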